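-- pv_equiv track=rewrite | github.com/bug-breeder/tlmn_rl | src/tlmn/encoding.py | straight_start_len_from_index
-- ===== SOURCE A (Python) =====
-- from typing import List, Tuple, Dict, Optional, Set
--
-- STRAIGHT_BASE = 92
--
-- def straight_start_len_from_index(index:int) -> Tuple[int,int]:
--     rel = index - STRAIGHT_BASE
--     acc = 0
--     for L in range(3, 13):
--         n = (12 - L + 1)
--         if rel < acc + n:
--             start = rel - acc
--             return start, L
--         acc += n
--     raise ValueError("bad straight index")
-- ===== SOURCE B (Python) =====
-- from math import isqrt
--
-- STRAIGHT_BASE = 92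
--
--
-- def _cum(k):
--     # total count of straights with length < k+3: buckets of sizes 10,9,...,11-k
--     return 10 * k - k * (k - 1) // 2
--
--
-- def straight_start_len_from_index(index: int):
--     rel = index - STRAIGHT_BASE
--     if rel >= 55:
--         raise ValueError("bad straight index")
--     if rel < 10:
--         return rel, 3
--     # closed-form inverse of the triangular cumulative sizes, with +-1 correction
--     k = (21 - isqrt(441 - 8 * rel)) // 2
--     if _cum(k + 1) <= rel:
--         k += 1
--     elif rel < _cum(k):
--         k -= 1
--     return rel - _cum(k), k + 3
-- ===== Notes on version B (the rewrite author's own statement) =====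
-- stated objective: alternative
-- what changed: Replaces the 10-step linear scan over bucket sizes (10,9,...,1) with a closed-form integer-isqrt inverse of the triangular cumulative counts, with a +-1 correction.
import Mathlib
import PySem

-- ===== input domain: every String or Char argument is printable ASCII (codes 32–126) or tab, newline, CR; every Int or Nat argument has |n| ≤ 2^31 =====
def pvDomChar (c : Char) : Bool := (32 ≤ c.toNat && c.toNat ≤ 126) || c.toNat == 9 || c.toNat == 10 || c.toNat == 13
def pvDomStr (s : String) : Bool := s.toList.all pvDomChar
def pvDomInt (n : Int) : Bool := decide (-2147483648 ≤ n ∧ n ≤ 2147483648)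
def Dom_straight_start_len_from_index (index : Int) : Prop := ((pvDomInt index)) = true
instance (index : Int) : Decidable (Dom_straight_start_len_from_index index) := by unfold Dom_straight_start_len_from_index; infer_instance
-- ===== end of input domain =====

-- ===== PORT A =====
-- B replaces A's linear bucket scan by a closed-form isqrt inverse of the triangular
-- cumulative sizes (alternative decomposition, same cost). A raises ValueError for
-- index - 92 >= 55; those inputs are excluded by Pre_.
-- straightLoop: the 'for L in range(3,13)' scan with accumulator acc; none = fell through to raise.
def straightLoop (rel : Int) : List Int → Int → Option (Int × Int)
  | [], _ => none
  | L :: rest, acc =>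
    if rel < acc + (12 - L + 1) then some (rel - acc, L)
    else straightLoop rel rest (acc + (12 - L + 1))

def straight_start_len_from_index (index : Int) : Int × Int :=
  (straightLoop (index - 92) (PySem.List.pyRange 3 13 1) 0).getD (0, 0)

-- ===== PORT B =====
def cum_straight (k : Int) : Int := 10 * k - PySem.Int.floordiv (k * (k - 1)) 2

def straight_start_len_from_index_alt (index : Int) : Int × Int :=
  let rel := index - 92
  if 55 ≤ rel then (0, 0)  -- Python B raises ValueError here; outside Pre_
  else if rel < 10 then (rel, 3)
  else
    let k0 := PySem.Int.floordiv (21 - Int.sqrt (441 - 8 * rel)) 2   -- math.isqrt; argument ≥ 9 here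
    let k := if cum_straight (k0 + 1) ≤ rel then k0 + 1
             else if rel < cum_straight k0 then k0 - 1 else k0
    (rel - cum_straight k, k + 3)

-- ===== PRECONDITION & SPEC =====
-- A raises ValueError exactly when index - 92 >= 55.
def Pre_straight_start_len_from_index (index : Int) : Prop := index < 147
instance (index : Int) : Decidable (Pre_straight_start_len_from_index index) := by
  unfold Pre_straight_start_len_from_index; infer_instance
def pvWitness_straight_start_len_from_index : Int := 120

def Spec_straight_start_len_from_index (index : Int) (out : Int × Int) : Prop := out = straight_start_len_from_index_alt index
instance (index : Int) (out : Int × Int) : Decidable (Spec_straight_start_len_from_index index out) := by unfold Spec_straight_start_len_from_index; infer_instance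

-- ===== CLAIM (what is proved, stated in full; the proofs are below) =====
def Claim_equal_straight_start_len_from_index : Prop := ∀ (index : Int), Dom_straight_start_len_from_index index → Pre_straight_start_len_from_index index → Spec_straight_start_len_from_index index (straight_start_len_from_index index)

-- ===== LEMMAS AND PROOFS =====
theorem pyRange_3_13 : PySem.List.pyRange 3 13 1 = [3,4,5,6,7,8,9,10,11,12] := by decide

-- ===== VERDICT (by name: the statement is the Claim_ definition above) =====
theorem straight_start_len_from_index_spec : Claim_equal_straight_start_len_from_index := by
  intro index hdom hpre
  unfold Spec_straight_start_len_from_index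
  by_cases h : index < 102
  · -- rel < 10: A's first bucket fires; B's early return
    have h2 : ¬ (55 ≤ index - 92) := by omega
    have h3 : index - 92 < 10 := by omega
    simp [straight_start_len_from_index, pyRange_3_13, straightLoop,
      straight_start_len_from_index_alt, h2, h3]
  · -- 102 ≤ index < 147: finite range, check every case
    unfold Pre_straight_start_len_from_index at hpre
    have h102 : 102 ≤ index := by omega
    interval_cases index <;>
      norm_num [straight_start_len_from_index, straight_start_len_from_index_alt,
        pyRange_3_13, straightLoop, cum_straight, PySem.Int.floordiv] <;> decide
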